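-- pv_equiv track=rewrite | github.com/AyushAgnihotri2025/CP-Solutions | GeeksforGeeks/Python3/Medium/Minimize Cash Flow/minimize-cash-flow.py | minCashFlow
-- ===== SOURCE A (Python) =====
-- from typing import List
--
-- def minCashFlow(n : int, g : List[List[int]]) -> List[List[int]]:
--     # code here
--     ans=[[0 for _ in range(n)] for _ in range(n)]
--     graph=[[] for _ in range(n)]
--     amounts=[0 for i in range(n)]
--     for i in range(n):
--         for j in range(n):
--             if g[i][j]:
--                 graph[i].append((j,g[i][j]))
--     for i in range(n):
--         size=len(graph[i])
--         for j in range(size):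
--             v =  graph[i][j][0]
--             w=  graph[i][j][1]
--             amounts [i] -= w
--             amounts[v] += w
--     for i in range(n):
--         maxCredit=maxDebit=0
--         credit=debit=None
--         for j in range(n):
--             if amounts[j] > maxCredit:
--                 credit=j
--                 maxCredit=amounts[j]
--             if amounts[j] < maxDebit:
--                 debit=j
--                 maxDebit=amounts[j]
--         if maxCredit and maxDebit:
--             if maxCredit >= abs(maxDebit):
--                 ans[debit][credit]= abs(maxDebit)
--                 amounts[debit] = 0
--                 amounts[credit] -= abs(maxDebit)
--             else:
--                 ans[debit][credit]= maxCredit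
--                 amounts[debit] += maxCredit
--                 amounts[credit] = 0
--     return ans
-- ===== SOURCE B (Python) =====
-- from typing import List
--
-- def _settle(ans: List[List[int]], amounts: List[int]) -> None:
--     mx = max(amounts, default=0)
--     mn = min(amounts, default=0)
--     if mx > 0 and mn < 0:
--         c = amounts.index(mx)
--         d = amounts.index(mn)
--         ans[d][c] = min(mx, -mn)
--         if mx >= -mn:
--             amounts[d], amounts[c] = 0, mx + mn
--         else:
--             amounts[d], amounts[c] = mx + mn, 0
--         _settle(ans, amounts)
--
-- def minCashFlow(n: int, g: List[List[int]]) -> List[List[int]]: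
--     amounts = [sum(g[k][i] for k in range(n)) - sum(g[i][k] for k in range(n))
--                for i in range(n)]
--     ans = [[0] * n for _ in range(n)]
--     _settle(ans, amounts)
--     return ans
-- ===== Notes on version B (the rewrite author's own statement) =====
-- stated objective: simpler
-- what changed: B computes each net balance directly as column-sum minus row-sum of g (dropping A's adjacency-list intermediate) and settles by recursing until no creditor/debtor pair remains, instead of A's fixed n-iteration loop whose trailing iterations are no-ops.
import Mathlib
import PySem

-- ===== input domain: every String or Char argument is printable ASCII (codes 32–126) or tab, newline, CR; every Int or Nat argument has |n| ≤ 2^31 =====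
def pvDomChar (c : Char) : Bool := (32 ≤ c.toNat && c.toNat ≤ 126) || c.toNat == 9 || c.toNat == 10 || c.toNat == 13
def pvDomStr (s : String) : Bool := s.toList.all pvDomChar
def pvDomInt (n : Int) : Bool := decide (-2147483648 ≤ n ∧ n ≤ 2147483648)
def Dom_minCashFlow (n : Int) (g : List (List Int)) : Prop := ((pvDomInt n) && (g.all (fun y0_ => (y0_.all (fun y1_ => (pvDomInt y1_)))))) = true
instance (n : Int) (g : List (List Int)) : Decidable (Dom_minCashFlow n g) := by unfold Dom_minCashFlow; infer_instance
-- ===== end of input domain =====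

-- B computes the net balances directly by row/column sums (no adjacency-list intermediate) and
-- settles by recursing until no creditor/debtor pair remains, instead of A's fixed n-iteration
-- loop whose trailing iterations are no-ops; same return value (objective: simpler).

-- ===== PORT A =====
def pvSetMat (ans : List (List Int)) (d c : Nat) (t : Int) : List (List Int) :=
  ans.set d ((ans.getD d []).set c t)

-- A's inner selection loop body (state = ((maxCredit, credit), (maxDebit, debit)))
def pvSelStep (am : List Int) (s : (Int × Option Nat) × (Int × Option Nat)) (j : Nat) :
    (Int × Option Nat) × (Int × Option Nat) :=
  let aj := am.getD j 0
  ((if aj > s.1.1 then (aj, some j) else s.1),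
   (if aj < s.2.1 then (aj, some j) else s.2))

-- one iteration of A's third loop
def pvStepA (N : Nat) (st : List (List Int) × List Int) : List (List Int) × List Int :=
  let ans := st.1
  let am := st.2
  let sel := (List.range N).foldl (pvSelStep am) ((0, none), (0, none))
  let mc := sel.1.1
  let cr := sel.1.2
  let md := sel.2.1
  let db := sel.2.2
  if mc ≠ 0 ∧ md ≠ 0 then
    let d := db.getD 0
    let c := cr.getD 0
    if mc ≥ |md| then
      (pvSetMat ans d c |md|,
       (am.set d 0).set c ((am.set d 0).getD c 0 - |md|))
    else
      (pvSetMat ans d c mc,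
       (am.set d (am.getD d 0 + mc)).set c 0)
  else st

def pvGraph (N : Nat) (g : List (List Int)) : List (List (Nat × Int)) :=
  (List.range N).map (fun i =>
    (List.range N).foldl (fun acc j =>
      if (g.getD i []).getD j 0 ≠ 0 then acc ++ [(j, (g.getD i []).getD j 0)] else acc) [])

def pvInner (i : Nat) (gi : List (Nat × Int)) (am2 : List Int) (j : Nat) : List Int :=
  let v := (gi.getD j (0, 0)).1
  let w := (gi.getD j (0, 0)).2
  let am3 := am2.set i (am2.getD i 0 - w)
  am3.set v (am3.getD v 0 + w)

def pvAmountsA (N : Nat) (g : List (List Int)) : List Int :=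
  (List.range N).foldl (fun am i =>
    let gi := (pvGraph N g).getD i []
    (List.range gi.length).foldl (pvInner i gi) am) (List.replicate N (0 : Int))

def minCashFlow (n : Int) (g : List (List Int)) : List (List Int) :=
  -- N = n.toNat on every input of Pre_ (there n.toNat ≤ g.length); the clamp only keeps the
  -- port total-in-practice on inputs outside Pre_, where the Python raises IndexError
  let N := min n.toNat g.length
  let ans := List.replicate N (List.replicate N (0 : Int))
  let amounts := pvAmountsA N g
  ((List.range N).foldl (fun st _ => pvStepA N st) (ans, amounts)).1

-- ===== PORT B =====
-- (the recursion of B's Python terminates because each settlement zeroes one nonzero balance;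
--  the fuel N = n bounds it in Lean and is never exhausted first)
def pvSetMatB (ans : List (List Int)) (d c : Nat) (t : Int) : List (List Int) :=
  ans.set d ((ans.getD d []).set c t)

def pvSettle (ans : List (List Int)) (am : List Int) : Nat → List (List Int)
  | 0 => ans
  | fuel + 1 =>
    let mx := (PySem.List.max? am (fun y => y)).getD 0
    let mn := (PySem.List.min? am (fun y => y)).getD 0
    if mx > 0 ∧ mn < 0 then
      let c := (PySem.List.index? am mx).getD 0
      let d := (PySem.List.index? am mn).getD 0
      let ans' := pvSetMatB ans d c (min mx (-mn))
      let am' := if mx ≥ -mn then (am.set d 0).set c (mx + mn)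
                 else (am.set d (mx + mn)).set c 0
      pvSettle ans' am' fuel
    else ans

def minCashFlow_alt (n : Int) (g : List (List Int)) : List (List Int) :=
  -- same clamp as in the port of A: identity on Pre_, where B's Python returns
  let N := min n.toNat g.length
  let amounts : List Int :=
    (List.range N).map (fun i =>
      ((List.range N).map (fun k => (g.getD k []).getD i 0)).sum
      - ((List.range N).map (fun k => (g.getD i []).getD k 0)).sum)
  pvSettle (List.replicate N (List.replicate N (0 : Int))) amounts N


-- ===== PRECONDITION & SPEC =====
-- Pre_ excludes exactly the inputs where Python A raises IndexError: it reads g[i][j] for all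
-- 0 <= i, j < n, so g needs at least n rows each of length at least n (for n <= 0 A returns []).
def Pre_minCashFlow (n : Int) (g : List (List Int)) : Prop :=
  n.toNat ≤ g.length ∧ ∀ row ∈ g.take n.toNat, n.toNat ≤ row.length
instance (n : Int) (g : List (List Int)) : Decidable (Pre_minCashFlow n g) := by
  unfold Pre_minCashFlow; infer_instance
def pvWitness_minCashFlow : Int × List (List Int) := (2, [[0, 3], [0, 0]])

def Spec_minCashFlow (n : Int) (g : List (List Int)) (out : List (List Int)) : Prop := out = minCashFlow_alt n g
instance (n : Int) (g : List (List Int)) (out : List (List Int)) : Decidable (Spec_minCashFlow n g out) := by unfold Spec_minCashFlow; infer_instance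

-- ===== CLAIM (what is proved, stated in full; the proofs are below) =====
def Claim_equal_minCashFlow : Prop := ∀ (n : Int) (g : List (List Int)), Dom_minCashFlow n g → Pre_minCashFlow n g → Spec_minCashFlow n g (minCashFlow n g)

-- ===== LEMMAS AND PROOFS =====
def pvCredF : (Int × Option Nat) → (Int × Nat) → (Int × Option Nat) :=
  fun c p => if p.1 > c.1 then (p.1, some p.2) else c

theorem cred_char (am : List Int) (o : Nat) (mc : Int) (cr : Option Nat) :
    (am.zipIdx o).foldl pvCredF (mc, cr)
      = match PySem.List.max? am (fun y => y) with
        | none => (mc, cr)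
        | some M => if mc < M then (M, some (o + (PySem.List.index? am M).getD 0)) else (mc, cr) := by
  induction am generalizing o mc cr with
  | nil => simp [PySem.List.max?]
  | cons x t ih =>
    rw [List.zipIdx_cons, List.foldl_cons]
    have hstep : pvCredF (mc, cr) (x, o) = if x > mc then (x, some o) else (mc, cr) := rfl
    rw [hstep, PySem.List.max?_id_cons]
    cases t with
    | nil =>
      simp only [List.zipIdx_nil, List.foldl_nil]
      by_cases hx : mc < x
      · simp [hx]
      · simp [hx]
    | cons y t' =>
      have hMt : PySem.List.max? (y :: t') (fun y => y) = some (t'.foldl max y) :=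
        PySem.List.max?_id_cons y t'
      have hM : (y :: t').foldl max x = max x (t'.foldl max y) := by
        rw [List.foldl_cons, List.foldl_assoc]
      set Mt := t'.foldl max y with hMtdef
      have hMtmem : Mt ∈ (y :: t') := PySem.List.max?_mem hMt
      by_cases hx : mc < x
      · rw [if_pos hx, ih (o+1) x (some o), hMt]
        dsimp only
        by_cases hxMt : x < Mt
        · rw [if_pos hxMt]
          have hne : x ≠ Mt := ne_of_lt hxMt
          have hsome : (PySem.List.index? (y :: t') Mt).isSome := by
            rw [PySem.List.index?_eq_idxOf?]; exact List.isSome_idxOf?.mpr hMtmem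
          obtain ⟨i, hi⟩ := Option.isSome_iff_exists.mp hsome
          rw [hM, max_eq_right (le_of_lt hxMt), if_pos (lt_trans hx hxMt),
              PySem.List.index?_cons_of_ne _ hne, hi]
          simp; omega
        · rw [if_neg hxMt, hM, max_eq_left (not_lt.mp hxMt), if_pos hx,
              PySem.List.index?_cons_self]
          simp
      · rw [if_neg hx, ih (o+1) mc cr, hMt]
        dsimp only
        have hxle : x ≤ mc := not_lt.mp hx
        by_cases hmcMt : mc < Mt
        · rw [if_pos hmcMt]
          have hne : x ≠ Mt := ne_of_lt (lt_of_le_of_lt hxle hmcMt)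
          have hsome : (PySem.List.index? (y :: t') Mt).isSome := by
            rw [PySem.List.index?_eq_idxOf?]; exact List.isSome_idxOf?.mpr hMtmem
          obtain ⟨i, hi⟩ := Option.isSome_iff_exists.mp hsome
          rw [hM, max_eq_right (le_of_lt (lt_of_le_of_lt hxle hmcMt)), if_pos hmcMt,
              PySem.List.index?_cons_of_ne _ hne, hi]
          simp; omega
        · rw [if_neg hmcMt, hM]
          have hle : max x Mt ≤ mc := max_le hxle (not_lt.mp hmcMt)
          rw [if_neg (not_lt.mpr hle)]

def pvDebF : (Int × Option Nat) → (Int × Nat) → (Int × Option Nat) :=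
  fun c p => if p.1 < c.1 then (p.1, some p.2) else c

theorem deb_char (am : List Int) (o : Nat) (md : Int) (db : Option Nat) :
    (am.zipIdx o).foldl pvDebF (md, db)
      = match PySem.List.min? am (fun y => y) with
        | none => (md, db)
        | some m => if m < md then (m, some (o + (PySem.List.index? am m).getD 0)) else (md, db) := by
  induction am generalizing o md db with
  | nil => simp [PySem.List.min?]
  | cons x t ih =>
    rw [List.zipIdx_cons, List.foldl_cons]
    have hstep : pvDebF (md, db) (x, o) = if x < md then (x, some o) else (md, db) := rfl
    rw [hstep, PySem.List.min?_id_cons]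
    cases t with
    | nil =>
      simp only [List.zipIdx_nil, List.foldl_nil]
      by_cases hx : x < md
      · simp [hx]
      · simp [hx]
    | cons y t' =>
      have hMt : PySem.List.min? (y :: t') (fun y => y) = some (t'.foldl min y) :=
        PySem.List.min?_id_cons y t'
      have hM : (y :: t').foldl min x = min x (t'.foldl min y) := by
        rw [List.foldl_cons, List.foldl_assoc]
      set mt := t'.foldl min y with hmtdef
      have hmtmem : mt ∈ (y :: t') := PySem.List.min?_mem hMt
      by_cases hx : x < md
      · rw [if_pos hx, ih (o+1) x (some o), hMt]
        dsimp only
        by_cases hxmt : mt < x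
        · rw [if_pos hxmt]
          have hne : x ≠ mt := (ne_of_lt hxmt).symm
          have hsome : (PySem.List.index? (y :: t') mt).isSome := by
            rw [PySem.List.index?_eq_idxOf?]; exact List.isSome_idxOf?.mpr hmtmem
          obtain ⟨i, hi⟩ := Option.isSome_iff_exists.mp hsome
          rw [hM, min_eq_right (le_of_lt hxmt), if_pos (lt_trans hxmt hx),
              PySem.List.index?_cons_of_ne _ hne, hi]
          simp; omega
        · rw [if_neg hxmt, hM, min_eq_left (not_lt.mp hxmt), if_pos hx,
              PySem.List.index?_cons_self]
          simp
      · rw [if_neg hx, ih (o+1) md db, hMt]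
        dsimp only
        have hxge : md ≤ x := not_lt.mp hx
        by_cases hmdmt : mt < md
        · rw [if_pos hmdmt]
          have hne : x ≠ mt := (ne_of_lt (lt_of_lt_of_le hmdmt hxge)).symm
          have hsome : (PySem.List.index? (y :: t') mt).isSome := by
            rw [PySem.List.index?_eq_idxOf?]; exact List.isSome_idxOf?.mpr hmtmem
          obtain ⟨i, hi⟩ := Option.isSome_iff_exists.mp hsome
          rw [hM, min_eq_right (le_of_lt (lt_of_lt_of_le hmdmt hxge)), if_pos hmdmt,
              PySem.List.index?_cons_of_ne _ hne, hi]
          simp; omega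
        · rw [if_neg hmdmt, hM]
          have hle : md ≤ min x mt := le_min hxge (not_lt.mp hmdmt)
          rw [if_neg (not_lt.mpr hle)]

theorem foldl_range_getD_idx {α β : Type} (l : List α) (d : α) (h : β → Nat → α → β) (init : β) :
    (List.range l.length).foldl (fun s j => h s j (l.getD j d)) init
      = l.zipIdx.foldl (fun s p => h s p.2 p.1) init := by
  induction l using List.reverseRecOn with
  | nil => simp
  | append_singleton l' x ih =>
    rw [List.length_append, List.length_singleton, List.range_succ, List.foldl_append,
        List.zipIdx_append, List.foldl_append]
    have hcongr : (List.range l'.length).foldl (fun s j => h s j ((l' ++ [x]).getD j d)) init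
        = (List.range l'.length).foldl (fun s j => h s j (l'.getD j d)) init := by
      apply PySem.List.foldl_congr_mem
      intro acc j hj
      have hjlt := List.mem_range.mp hj
      simp [List.getD_eq_getElem?_getD, List.getElem?_append_left hjlt]
    rw [hcongr, ih]
    simp [List.getD_eq_getElem?_getD]

def pvMx (am : List Int) : Int := (PySem.List.max? am (fun y => y)).getD 0
def pvMn (am : List Int) : Int := (PySem.List.min? am (fun y => y)).getD 0

theorem sel_eq (am : List Int) :
    (List.range am.length).foldl (pvSelStep am) ((0, none), (0, none))
      = (am.zipIdx.foldl pvCredF (0, none), am.zipIdx.foldl pvDebF (0, none)) := by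
  have h1 : (List.range am.length).foldl (pvSelStep am) ((0, none), (0, none))
      = am.zipIdx.foldl (fun s p => (pvCredF s.1 p, pvDebF s.2 p)) ((0, none), (0, none)) :=
    foldl_range_getD_idx am 0 (fun s j a => (pvCredF s.1 (a, j), pvDebF s.2 (a, j))) _
  rw [h1, PySem.List.foldl_prod_mk]

theorem sel_full (am : List Int) :
    (List.range am.length).foldl (pvSelStep am) ((0, none), (0, none))
      = ((if 0 < pvMx am then (pvMx am, some ((PySem.List.index? am (pvMx am)).getD 0)) else (0, none)),
         (if pvMn am < 0 then (pvMn am, some ((PySem.List.index? am (pvMn am)).getD 0)) else (0, none))) := by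
  rw [sel_eq]
  cases am with
  | nil => simp [pvMx, pvMn, PySem.List.max?, PySem.List.min?]
  | cons x t =>
    rw [cred_char _ 0 0 none, deb_char _ 0 0 none,
        PySem.List.max?_id_cons x t, PySem.List.min?_id_cons x t]
    dsimp only
    simp [pvMx, pvMn, PySem.List.max?_id_cons, PySem.List.min?_id_cons]

theorem getD_set_lt (l : List Int) (a : Nat) (x : Int) (p : Nat) (ha : a < l.length) :
    (l.set a x).getD p 0 = if p = a then x else l.getD p 0 := by
  simp [List.getD_eq_getElem?_getD, List.getElem?_set]
  split <;> rename_i h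
  · simp [h]
  · split <;> simp_all

theorem index_facts (am : List Int) (v : Int) (hv : v ∈ am) :
    ∃ k, PySem.List.index? am v = some k ∧ ∃ hk : k < am.length, am[k] = v := by
  have hsome : (PySem.List.index? am v).isSome := by
    rw [PySem.List.index?_eq_idxOf?]; exact List.isSome_idxOf?.mpr hv
  obtain ⟨k, hk⟩ := Option.isSome_iff_exists.mp hsome
  obtain ⟨hlt, heq, _⟩ := PySem.List.getElem_of_index?_eq_some hk
  exact ⟨k, hk, hlt, heq⟩

theorem stepA_char (ans : List (List Int)) (am : List Int) :
    pvStepA am.length (ans, am) =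
      if 0 < pvMx am ∧ pvMn am < 0 then
        let mx := pvMx am
        let mn := pvMn am
        let c := (PySem.List.index? am mx).getD 0
        let d := (PySem.List.index? am mn).getD 0
        (pvSetMat ans d c (min mx (-mn)),
         if mx ≥ -mn then (am.set d 0).set c (mx + mn) else (am.set d (mx + mn)).set c 0)
      else (ans, am) := by
  unfold pvStepA
  dsimp only
  rw [sel_full]
  by_cases hpair : 0 < pvMx am ∧ pvMn am < 0
  · obtain ⟨hmx, hmn⟩ := hpair
    rw [if_pos hmx, if_pos hmn]
    dsimp only
    rw [if_pos ⟨ne_of_gt hmx, ne_of_lt hmn⟩, if_pos (And.intro hmx hmn)]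
    -- facts about the extremal elements
    have hmxmem : pvMx am ∈ am := by
      cases am with
      | nil => simp [pvMx, PySem.List.max?] at hmx
      | cons x t =>
        have hx : pvMx (x :: t) = t.foldl max x := by simp [pvMx, PySem.List.max?_id_cons]
        rw [hx]; exact PySem.List.max?_mem (PySem.List.max?_id_cons x t)
    have hmnmem : pvMn am ∈ am := by
      cases am with
      | nil => simp [pvMn, PySem.List.min?] at hmn
      | cons x t =>
        have hx : pvMn (x :: t) = t.foldl min x := by simp [pvMn, PySem.List.min?_id_cons]
        rw [hx]; exact PySem.List.min?_mem (PySem.List.min?_id_cons x t)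
    obtain ⟨c, hcidx, hclt, hceq⟩ := index_facts am (pvMx am) hmxmem
    obtain ⟨d, hdidx, hdlt, hdeq⟩ := index_facts am (pvMn am) hmnmem
    rw [hcidx, hdidx]
    dsimp only [Option.getD_some]
    have hdc : d ≠ c := by
      intro h; subst h
      have hcontra : pvMx am = pvMn am := by rw [← hceq]; exact hdeq
      omega
    have habs : |pvMn am| = -(pvMn am) := abs_of_neg hmn
    rw [habs]
    have hgetc : (am.set d 0).getD c 0 = pvMx am := by
      rw [getD_set_lt _ _ _ _ hdlt, if_neg (fun h => hdc h.symm),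
          List.getD_eq_getElem _ _ hclt, hceq]
    have hgetd : am.getD d 0 = pvMn am := by
      rw [List.getD_eq_getElem _ _ hdlt, hdeq]
    by_cases hge : pvMx am ≥ -(pvMn am)
    · rw [if_pos hge, if_pos hge, hgetc]
      have h1 : pvMx am - -pvMn am = pvMx am + pvMn am := by ring
      have h2 : min (pvMx am) (-(pvMn am)) = -(pvMn am) := min_eq_right hge
      rw [h1, h2]
    · rw [if_neg hge, if_neg hge, hgetd]
      have h1 : pvMn am + pvMx am = pvMx am + pvMn am := by ring
      have h2 : min (pvMx am) (-(pvMn am)) = pvMx am := min_eq_left (le_of_lt (not_le.mp hge))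
      rw [h1, h2]
  · rw [if_neg hpair]
    rcases not_and_or.mp hpair with h | h
    · rw [if_neg h]
      dsimp only
      rw [if_neg (fun hc => hc.1 rfl)]
    · rw [if_neg h]
      dsimp only
      by_cases h0 : 0 < pvMx am
      · rw [if_pos h0]; dsimp only
        rw [if_neg (fun hc => hc.2 rfl)]
      · rw [if_neg h0]; dsimp only
        rw [if_neg (fun hc => hc.1 rfl)]

theorem settle_nopair (ans : List (List Int)) (am : List Int) (k : Nat)
    (h : ¬ (0 < pvMx am ∧ pvMn am < 0)) : pvSettle ans am k = ans := by
  cases k with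
  | zero => rfl
  | succ k =>
    unfold pvSettle
    dsimp only
    rw [if_neg (by exact fun hc => h ⟨hc.1, hc.2⟩)]

theorem loop_eq (N : Nat) (k : Nat) : ∀ (ans : List (List Int)) (am : List Int), am.length = N →
    ((fun st => pvStepA N st)^[k] (ans, am)).1 = pvSettle ans am k := by
  induction k with
  | zero => intro ans am _; rfl
  | succ k ih =>
    intro ans am hlen
    rw [Function.iterate_succ_apply]
    have hstep : pvStepA N (ans, am) = pvStepA am.length (ans, am) := by rw [hlen]
    by_cases hpair : 0 < pvMx am ∧ pvMn am < 0
    · have hpair' : ((PySem.List.max? am fun y => y).getD 0 > 0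
          ∧ (PySem.List.min? am fun y => y).getD 0 < 0) := hpair
      have hset : ∀ (d c : Nat) (x y : Int), ((am.set d x).set c y).length = N := by
        intro d c x y; simp [hlen]
      by_cases hge : pvMx am ≥ -(pvMn am)
      · have hge' : ((PySem.List.max? am fun y => y).getD 0
            ≥ -((PySem.List.min? am fun y => y).getD 0)) := hge
        rw [hstep, stepA_char, if_pos hpair]
        dsimp only
        rw [if_pos hge, ih _ _ (hset _ _ _ _)]
        conv_rhs => unfold pvSettle
        dsimp only
        rw [if_pos hpair', if_pos hge']
        simp only [pvMx, pvMn, pvSetMat, pvSetMatB]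
      · have hge' : ¬ ((PySem.List.max? am fun y => y).getD 0
            ≥ -((PySem.List.min? am fun y => y).getD 0)) := hge
        rw [hstep, stepA_char, if_pos hpair]
        dsimp only
        rw [if_neg hge, ih _ _ (hset _ _ _ _)]
        conv_rhs => unfold pvSettle
        dsimp only
        rw [if_pos hpair', if_neg hge']
        simp only [pvMx, pvMn, pvSetMat, pvSetMatB]
    · rw [hstep, stepA_char, if_neg hpair, ih _ _ hlen,
          settle_nopair _ _ _ hpair, settle_nopair _ _ _ hpair]

def pvRowStep (i : Nat) (am2 : List Int) (e : Nat × Int) : List Int :=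
  (am2.set i (am2.getD i 0 - e.2)).set e.1
    (((am2.set i (am2.getD i 0 - e.2)).getD e.1 0) + e.2)

theorem length_pvRowStep (i : Nat) (am : List Int) (e : Nat × Int) :
    (pvRowStep i am e).length = am.length := by simp [pvRowStep]

theorem pvRowStep_getD (i : Nat) (am : List Int) (e : Nat × Int)
    (hi : i < am.length) (he : e.1 < am.length) (p : Nat) :
    (pvRowStep i am e).getD p 0
      = am.getD p 0 + ((if e.1 = p then e.2 else 0) - (if i = p then e.2 else 0)) := by
  unfold pvRowStep
  rw [getD_set_lt _ _ _ _ (by simpa using he), getD_set_lt _ _ _ _ hi,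
      getD_set_lt _ _ _ _ hi]
  by_cases h1 : p = e.1 <;> by_cases h2 : p = i <;> by_cases h3 : e.1 = i <;>
    (simp_all [eq_comm]; try ring)

theorem entries_fold (i : Nat) (es : List (Nat × Int)) : ∀ (am : List Int),
    (∀ e ∈ es, e.1 < am.length) → i < am.length →
    (es.foldl (pvRowStep i) am).length = am.length ∧
    ∀ p, (es.foldl (pvRowStep i) am).getD p 0
      = am.getD p 0 + (es.map (fun e => (if e.1 = p then e.2 else 0) - (if i = p then e.2 else 0))).sum := by
  induction es with
  | nil => intro am _ _; simp
  | cons e t ih =>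
    intro am hes hi
    rw [List.foldl_cons]
    have he : e.1 < am.length := hes e (by simp)
    have hlen := length_pvRowStep i am e
    obtain ⟨ihlen, ihgetD⟩ := ih (pvRowStep i am e)
      (fun e' he' => by rw [hlen]; exact hes e' (by simp [he']))
      (by rw [hlen]; exact hi)
    refine ⟨by rw [ihlen, hlen], fun p => ?_⟩
    rw [ihgetD p, pvRowStep_getD i am e hi he p, List.map_cons, List.sum_cons]
    ring

theorem outer_fold (L : Nat) (es : Nat → List (Nat × Int)) (I : List Nat) : ∀ (am : List Int),
    am.length = L → (∀ i ∈ I, i < L) → (∀ i ∈ I, ∀ e ∈ es i, e.1 < L) →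
    (I.foldl (fun am i => (es i).foldl (pvRowStep i) am) am).length = L ∧
    ∀ p, (I.foldl (fun am i => (es i).foldl (pvRowStep i) am) am).getD p 0
      = am.getD p 0 + (I.map (fun i =>
          ((es i).map (fun e => (if e.1 = p then e.2 else 0) - (if i = p then e.2 else 0))).sum)).sum := by
  induction I with
  | nil => intro am hlen _ _; simpa using hlen
  | cons i t ih =>
    intro am hlen hIlt hes
    rw [List.foldl_cons]
    have hi : i < am.length := by rw [hlen]; exact hIlt i (by simp)
    obtain ⟨elen, egetD⟩ := entries_fold i (es i) am
      (fun e he => by rw [hlen]; exact hes i (by simp) e he) hi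
    obtain ⟨tlen, tgetD⟩ := ih ((es i).foldl (pvRowStep i) am) (by rw [elen, hlen])
      (fun i' hi' => hIlt i' (by simp [hi']))
      (fun i' hi' => hes i' (by simp [hi']))
    refine ⟨tlen, fun p => ?_⟩
    rw [tgetD p, egetD p, List.map_cons, List.sum_cons]
    ring

theorem sum_range_ite (N p : Nat) (f : Nat → Int) :
    ((List.range N).map (fun j => if j = p then f j else 0)).sum = if p < N then f p else 0 := by
  induction N with
  | zero => simp
  | succ N ih =>
    rw [List.range_succ, List.map_append, List.sum_append, ih]
    by_cases hp : p = N
    · subst hp; simp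
    · by_cases hlt : p < N <;> simp_all <;> omega

theorem sum_map_sub (l : List Nat) (f g : Nat → Int) :
    (l.map fun j => f j - g j).sum = (l.map f).sum - (l.map g).sum := by
  induction l with
  | nil => simp
  | cons x t ih => simp [ih]; ring

theorem sum_ite_const (l : List Nat) (c : Prop) [Decidable c] (f : Nat → Int) :
    (l.map fun j => if c then f j else 0).sum = if c then (l.map f).sum else 0 := by
  by_cases hc : c <;> simp [hc]

theorem sum_filter_zero (l : List Nat) (P : Nat → Prop) [DecidablePred P] (F : Nat → Int)
    (h : ∀ j ∈ l, ¬ P j → F j = 0) :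
    ((l.filter (fun j => decide (P j))).map F).sum = (l.map F).sum := by
  induction l with
  | nil => simp
  | cons x t ih =>
    rw [List.filter_cons]
    by_cases hx : P x
    · simp only [hx, decide_true, if_pos trivial, List.map_cons, List.sum_cons]
      rw [ih (fun j hj => h j (by simp [hj]))]
    · simp only [hx, decide_false, Bool.false_eq_true, if_false]
      rw [List.map_cons, List.sum_cons, h x (by simp) hx, ih (fun j hj => h j (by simp [hj]))]
      simp

theorem foldl_range_getD {α β : Type} (l : List α) (d : α) (F : β → α → β) (init : β) :
    (List.range l.length).foldl (fun s j => F s (l.getD j d)) init = l.foldl F init := by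
  rw [foldl_range_getD_idx l d (fun s _ a => F s a) init]
  conv_rhs => rw [← List.zipIdx_map_fst 0 l]
  rw [List.foldl_map]

def pvEntries (N : Nat) (g : List (List Int)) (i : Nat) : List (Nat × Int) :=
  ((List.range N).filter (fun j => decide ((g.getD i []).getD j 0 ≠ 0))).map
    (fun j => (j, (g.getD i []).getD j 0))

theorem graph_getD (N : Nat) (g : List (List Int)) (i : Nat) (hi : i < N) :
    (pvGraph N g).getD i [] = pvEntries N g i := by
  unfold pvGraph pvEntries
  rw [PySem.List.getD_map_range _ _ _ _ hi,
      PySem.List.foldl_append_ite (p := fun j => (g.getD i []).getD j 0 ≠ 0)]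
  simp

theorem amounts_eq (N : Nat) (g : List (List Int)) :
    pvAmountsA N g
    = (List.range N).map (fun i =>
        ((List.range N).map (fun k => (g.getD k []).getD i 0)).sum
        - ((List.range N).map (fun k => (g.getD i []).getD k 0)).sum) := by
  unfold pvAmountsA
  refine Eq.trans (PySem.List.foldl_congr_mem (List.range N) _
    (fun am i => (pvEntries N g i).foldl (pvRowStep i) am) (List.replicate N 0) ?_) ?_
  · intro am i hi
    dsimp only
    rw [graph_getD N g i (List.mem_range.mp hi)]
    have hfn : pvInner i (pvEntries N g i)
        = fun am2 j => pvRowStep i am2 ((pvEntries N g i).getD j (0, 0)) := rfl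
    rw [hfn]
    exact foldl_range_getD (pvEntries N g i) (0, 0) (pvRowStep i) am
  have hes : ∀ i ∈ List.range N, ∀ e ∈ pvEntries N g i, e.1 < N := by
    intro i _ e he
    simp only [pvEntries, List.mem_map, List.mem_filter, List.mem_range] at he
    obtain ⟨j, ⟨hj, _⟩, rfl⟩ := he
    exact hj
  obtain ⟨hlen, hgetD⟩ := outer_fold N (pvEntries N g) (List.range N) (List.replicate N 0)
    (by simp) (fun i hi => List.mem_range.mp hi) hes
  apply List.ext_getElem (by simp [hlen])
  intro p hp1 hp2
  have hpN : p < N := by simpa [hlen] using hp1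
  have hrep : (List.replicate N (0 : Int)).getD p 0 = 0 := by
    simp [List.getD_eq_getElem?_getD, List.getElem?_replicate]
    split <;> rfl
  rw [← List.getD_eq_getElem _ 0, ← List.getD_eq_getElem _ 0, hgetD p, hrep,
      PySem.List.getD_map_range _ _ _ _ hpN]
  have hinner : ∀ i, ((pvEntries N g i).map
      (fun e => (if e.1 = p then e.2 else 0) - (if i = p then e.2 else 0))).sum
      = (g.getD i []).getD p 0
        - (if i = p then ((List.range N).map (fun k => (g.getD i []).getD k 0)).sum else 0) := by
    intro i
    unfold pvEntries
    rw [List.map_map]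
    have hzero : ∀ j ∈ List.range N, ¬ ((g.getD i []).getD j 0 ≠ 0) →
        ((fun e => (if e.1 = p then e.2 else 0) - (if i = p then e.2 else 0))
          ∘ fun j => (j, (g.getD i []).getD j 0)) j = 0 := by
      intro j _ hj
      simp only [Function.comp_apply, not_not.mp hj]
      split <;> split <;> ring
    rw [sum_filter_zero _ _ _ hzero]
    have hco : ((List.range N).map ((fun e => (if e.1 = p then e.2 else 0) - (if i = p then e.2 else 0))
          ∘ fun j => (j, (g.getD i []).getD j 0))).sum
        = ((List.range N).map (fun j =>
            (if j = p then (g.getD i []).getD j 0 else 0)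
            - (if i = p then (g.getD i []).getD j 0 else 0))).sum := rfl
    rw [hco, sum_map_sub, sum_range_ite, sum_ite_const, if_pos hpN]
  rw [List.map_congr_left (fun i _ => hinner i), sum_map_sub, sum_range_ite, if_pos hpN]
  ring

theorem foldl_const_iterate {α β : Type} (l : List α) (f : β → β) (init : β) :
    l.foldl (fun s _ => f s) init = f^[l.length] init := by
  induction l generalizing init with
  | nil => rfl
  | cons x t ih => simp [List.foldl_cons, ih, Function.iterate_succ_apply]

theorem ports_agree (n : Int) (g : List (List Int)) :
    minCashFlow n g = minCashFlow_alt n g := by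
  unfold minCashFlow minCashFlow_alt
  dsimp only
  rw [foldl_const_iterate, List.length_range, amounts_eq]
  exact loop_eq (min n.toNat g.length) (min n.toNat g.length) _ _ (by simp)

-- ===== VERDICT (by name: the statement is the Claim_ definition above) =====
theorem minCashFlow_spec : Claim_equal_minCashFlow := by
  unfold Claim_equal_minCashFlow Spec_minCashFlow
  intro n g _ _
  exact ports_agree n g
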